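-- pv_equiv track=rewrite | github.com/vodka0629/Mahjong-2020 | mahjong/mj_math.py | get_not_in_123
-- ===== SOURCE A (Python) =====
-- def get_not_in_123(arr) -> set:
--     not_in_123 = set()
--     if not arr:
--         return not_in_123
--     unique = list(set(arr))
--     for x in unique:
--         if ((x + 1) in unique) and ((x - 1) in unique):
--             continue
--         if ((x + 1) in unique) and ((x + 2) in unique):
--             continue
--         if ((x - 1) in unique) and ((x - 2) in unique):
--             continue
--         not_in_123.add(x)
--
--     return not_in_123
-- ===== SOURCE B (Python) =====
-- def get_not_in_123(arr) -> set:
--     unique = set(arr)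
--     covered = set()
--     for t in unique:
--         if (t + 1) in unique and (t + 2) in unique:
--             covered.update((t, t + 1, t + 2))
--     return unique - covered
-- ===== Notes on version B (the rewrite author's own statement) =====
-- stated objective: faster
-- what changed: Instead of A's per-element test of three list-membership patterns (middle/start/end of a consecutive triple), B makes one pass over the unique values marking every consecutive triple's three members in a 'covered' set and returns the set difference unique - covered.
import Mathlib
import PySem

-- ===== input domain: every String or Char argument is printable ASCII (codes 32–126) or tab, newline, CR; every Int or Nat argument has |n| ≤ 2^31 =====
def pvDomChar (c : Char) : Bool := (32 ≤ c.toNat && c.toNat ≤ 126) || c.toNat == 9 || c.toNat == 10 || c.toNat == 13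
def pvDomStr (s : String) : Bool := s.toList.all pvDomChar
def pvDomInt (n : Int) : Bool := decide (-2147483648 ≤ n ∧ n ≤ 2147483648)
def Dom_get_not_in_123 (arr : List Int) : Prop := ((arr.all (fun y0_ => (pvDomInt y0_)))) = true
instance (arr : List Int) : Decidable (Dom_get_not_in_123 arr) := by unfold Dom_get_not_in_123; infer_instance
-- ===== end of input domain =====

-- B replaces A's per-element three-pattern membership test by one marking pass that collects
-- every member of a consecutive triple into a 'covered' set and returns unique - covered
-- (alternative decomposition; set-membership probes instead of list probes).
-- The Python return value is a set; the ports return its elements as a duplicate-free list.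

-- ===== PORT A =====
def get_not_in_123 (arr : List Int) : List Int :=
  let not_in_123 : PySem.Set Int := PySem.Set.empty
  if arr = [] then not_in_123
  else
    let unique : List Int := PySem.Set.ofList arr
    unique.foldl (fun s x =>
      if unique.contains (x + 1) && unique.contains (x - 1) then s
      else if unique.contains (x + 1) && unique.contains (x + 2) then s
      else if unique.contains (x - 1) && unique.contains (x - 2) then s
      else PySem.Set.add s x) not_in_123

-- ===== PORT B =====
def get_not_in_123_alt (arr : List Int) : List Int :=
  let unique : PySem.Set Int := PySem.Set.ofList arr
  let covered : PySem.Set Int := unique.foldl (fun c t =>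
    if unique.contains (t + 1) && unique.contains (t + 2) then
      PySem.Set.add (PySem.Set.add (PySem.Set.add c t) (t + 1)) (t + 2)
    else c) PySem.Set.empty
  PySem.Set.diff unique covered

-- ===== PRECONDITION & SPEC =====
def Spec_get_not_in_123 (arr : List Int) (out : List Int) : Prop := out = get_not_in_123_alt arr
instance (arr : List Int) (out : List Int) : Decidable (Spec_get_not_in_123 arr out) := by unfold Spec_get_not_in_123; infer_instance

-- ===== CLAIM (what is proved, stated in full; the proofs are below) =====
def Claim_equal_get_not_in_123 : Prop := ∀ (arr : List Int), Dom_get_not_in_123 arr → Spec_get_not_in_123 arr (get_not_in_123 arr)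

-- ===== LEMMAS AND PROOFS =====

-- A's fold over a duplicate-free list, adding exactly the kept elements, is `filter`.
theorem pv_foldl_keep (K : Int → Bool) :
    ∀ (u s : List Int), (∀ x ∈ u, x ∉ s) → u.Nodup →
      u.foldl (fun s x => if K x then PySem.Set.add s x else s) s = s ++ u.filter K := by
  intro u
  induction u with
  | nil => intro s _ _; simp
  | cons a u ih =>
    intro s hs hnd
    rw [List.foldl_cons]
    by_cases hK : K a = true
    · rw [if_pos hK, PySem.Set.add_of_not_mem (hs a (by simp))]
      rw [ih (s ++ [a])]
      · simp [List.filter_cons, hK]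
      · intro x hx
        simp only [List.mem_append, List.mem_singleton]
        rintro (h | rfl)
        · exact hs x (by simp [hx]) h
        · exact (List.nodup_cons.mp hnd).1 hx
      · exact (List.nodup_cons.mp hnd).2
    · rw [if_neg hK, ih s (fun x hx => hs x (by simp [hx])) (List.nodup_cons.mp hnd).2]
      simp [List.filter_cons, hK]

-- Membership in B's `covered` accumulator.
theorem pv_mem_covered (C : Int → Bool) :
    ∀ (l c : List Int) (y : Int),
      y ∈ l.foldl (fun c t =>
          if C t then PySem.Set.add (PySem.Set.add (PySem.Set.add c t) (t + 1)) (t + 2) else c) c ↔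
        y ∈ c ∨ ∃ t ∈ l, C t ∧ (y = t ∨ y = t + 1 ∨ y = t + 2) := by
  intro l
  induction l with
  | nil => intro c y; simp
  | cons a l ih =>
    intro c y
    rw [List.foldl_cons]
    by_cases hC : C a = true
    · rw [if_pos hC, ih]
      simp only [PySem.Set.mem_add, List.mem_cons]
      constructor
      · rintro ((((h | h) | h) | h) | ⟨t, ht, hc, hy⟩)
        · exact Or.inl h
        · exact Or.inr ⟨a, Or.inl rfl, hC, Or.inl h⟩
        · exact Or.inr ⟨a, Or.inl rfl, hC, Or.inr (Or.inl h)⟩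
        · exact Or.inr ⟨a, Or.inl rfl, hC, Or.inr (Or.inr h)⟩
        · exact Or.inr ⟨t, Or.inr ht, hc, hy⟩
      · rintro (h | ⟨t, (rfl | ht), hc, hy⟩)
        · exact Or.inl (Or.inl (Or.inl (Or.inl h)))
        · rcases hy with h | h | h
          · exact Or.inl (Or.inl (Or.inl (Or.inr h)))
          · exact Or.inl (Or.inl (Or.inr h))
          · exact Or.inl (Or.inr h)
        · exact Or.inr ⟨t, ht, hc, hy⟩
    · rw [if_neg hC, ih]
      constructor
      · rintro (h | ⟨t, ht, hc, hy⟩)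
        · exact Or.inl h
        · exact Or.inr ⟨t, List.mem_cons_of_mem a ht, hc, hy⟩
      · rintro (h | ⟨t, ht, hc, hy⟩)
        · exact Or.inl h
        · rcases List.mem_cons.mp ht with rfl | ht'
          · exact absurd hc hC
          · exact Or.inr ⟨t, ht', hc, hy⟩

-- ===== VERDICT (by name: the statement is the Claim_ definition above) =====
theorem get_not_in_123_spec : Claim_equal_get_not_in_123 := by
  unfold Claim_equal_get_not_in_123 Spec_get_not_in_123
  intro arr _
  unfold get_not_in_123 get_not_in_123_alt
  by_cases harr : arr = []
  · subst harr; rfl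
  · simp only [if_neg harr]
    set u : List Int := PySem.Set.ofList arr with hu
    have hnd : u.Nodup := PySem.Set.nodup_ofList arr
    -- A's fold body, as a single keep-condition
    have hbodyA :
        (fun (s : List Int) (x : Int) =>
          if u.contains (x + 1) && u.contains (x - 1) then s
          else if u.contains (x + 1) && u.contains (x + 2) then s
          else if u.contains (x - 1) && u.contains (x - 2) then s
          else PySem.Set.add s x)
        = (fun (s : List Int) (x : Int) =>
            if (!(u.contains (x + 1) && u.contains (x - 1))
                && !(u.contains (x + 1) && u.contains (x + 2))
                && !(u.contains (x - 1) && u.contains (x - 2))) then PySem.Set.add s x else s) := by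
      funext s x
      cases h1 : (u.contains (x + 1) && u.contains (x - 1)) <;>
        cases h2 : (u.contains (x + 1) && u.contains (x + 2)) <;>
          cases h3 : (u.contains (x - 1) && u.contains (x - 2)) <;>
            simp [h1, h2, h3]
    rw [hbodyA,
      pv_foldl_keep _ u PySem.Set.empty (by intro x _; simp [PySem.Set.empty]) hnd]
    simp only [PySem.Set.empty, List.nil_append]
    simp only [PySem.Set.contains_eq_listContains]
    -- B's side is also a filter of u (Set.diff is a filter, definitionally)
    show u.filter _ = PySem.Set.diff u _
    have hdiff : PySem.Set.diff u
        (u.foldl (fun c t =>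
          if u.contains (t + 1) && u.contains (t + 2) then
            PySem.Set.add (PySem.Set.add (PySem.Set.add c t) (t + 1)) (t + 2)
          else c) ([] : List Int))
        = u.filter (fun x => !(u.foldl (fun c t =>
            if u.contains (t + 1) && u.contains (t + 2) then
              PySem.Set.add (PySem.Set.add (PySem.Set.add c t) (t + 1)) (t + 2)
            else c) ([] : List Int)).contains x) := rfl
    refine Eq.trans ?_ hdiff.symm
    apply List.filter_congr
    intro x hx
    -- both keep-conditions say: x is not part of any consecutive triple inside u
    have hcov : (u.foldl (fun c t =>
        if u.contains (t + 1) && u.contains (t + 2) then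
          PySem.Set.add (PySem.Set.add (PySem.Set.add c t) (t + 1)) (t + 2)
        else c) ([] : List Int)).contains x = true
        ↔ ∃ t ∈ u, (u.contains (t + 1) && u.contains (t + 2)) = true
            ∧ (x = t ∨ x = t + 1 ∨ x = t + 2) := by
      rw [PySem.Set.contains_iff, pv_mem_covered]
      simp
    have hmem : ∀ z : Int, u.contains z = true ↔ z ∈ u := by
      intro z; exact PySem.Set.contains_iff u z
    by_cases htrip : ∃ t ∈ u, (u.contains (t + 1) && u.contains (t + 2)) = true
        ∧ (x = t ∨ x = t + 1 ∨ x = t + 2)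
    · -- x lies in a triple: A drops it, B drops it
      have hxcov : (u.foldl (fun c t =>
          if u.contains (t + 1) && u.contains (t + 2) then
            PySem.Set.add (PySem.Set.add (PySem.Set.add c t) (t + 1)) (t + 2)
          else c) ([] : List Int)).contains x = true := hcov.mpr htrip
      rw [hxcov]
      obtain ⟨t, ht, hc, hy⟩ := htrip
      have hcc : u.contains (t + 1) = true ∧ u.contains (t + 2) = true := by
        rw [← Bool.and_eq_true]; exact hc
      obtain ⟨hc1, hc2⟩ := hcc
      rcases hy with rfl | rfl | rfl
      · -- x = t : x+1, x+2 ∈ u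
        have h2 : (u.contains (x + 1) && u.contains (x + 2)) = true := by
          rw [Bool.and_eq_true]; exact ⟨hc1, hc2⟩
        rw [h2]
        simp only [Bool.not_true, Bool.and_false, Bool.false_and]
      · -- x = t+1 : x-1 = t ∈ u, x+1 = t+2 ∈ u
        have ha : u.contains (t + 1 + 1) = true := by
          have : t + 1 + 1 = t + 2 := by ring
          rw [this]; exact hc2
        have hb : u.contains (t + 1 - 1) = true := by
          have : t + 1 - 1 = t := by ring
          rw [this]; exact (hmem t).mpr ht
        have h1 : (u.contains (t + 1 + 1) && u.contains (t + 1 - 1)) = true := by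
          rw [Bool.and_eq_true]; exact ⟨ha, hb⟩
        rw [h1]
        simp only [Bool.not_true, Bool.and_false, Bool.false_and]
      · -- x = t+2 : x-1 = t+1 ∈ u, x-2 = t ∈ u
        have ha : u.contains (t + 2 - 1) = true := by
          have : t + 2 - 1 = t + 1 := by ring
          rw [this]; exact hc1
        have hb : u.contains (t + 2 - 2) = true := by
          have : t + 2 - 2 = t := by ring
          rw [this]; exact (hmem t).mpr ht
        have h3 : (u.contains (t + 2 - 1) && u.contains (t + 2 - 2)) = true := by
          rw [Bool.and_eq_true]; exact ⟨ha, hb⟩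
        rw [h3]
        simp only [Bool.not_true, Bool.and_false, Bool.false_and]
    · -- x lies in no triple: A keeps it, B keeps it
      have hxcov : (u.foldl (fun c t =>
          if u.contains (t + 1) && u.contains (t + 2) then
            PySem.Set.add (PySem.Set.add (PySem.Set.add c t) (t + 1)) (t + 2)
          else c) ([] : List Int)).contains x = false := by
        rw [← Bool.not_eq_true, hcov]; exact htrip
      rw [hxcov]
      have h1 : (u.contains (x + 1) && u.contains (x - 1)) = false := by
        rw [← Bool.not_eq_true, Bool.and_eq_true]
        rintro ⟨ha, hb⟩
        exact htrip ⟨x - 1, (hmem _).mp hb, by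
          constructor
          · rw [Bool.and_eq_true]
            constructor
            · have : x - 1 + 1 = x := by ring
              rw [this]; exact (hmem x).mpr hx
            · have : x - 1 + 2 = x + 1 := by ring
              rw [this]; exact ha
          · right; left; ring⟩
      have h2 : (u.contains (x + 1) && u.contains (x + 2)) = false := by
        rw [← Bool.not_eq_true]
        intro hcond
        exact htrip ⟨x, hx, hcond, Or.inl rfl⟩
      have h3 : (u.contains (x - 1) && u.contains (x - 2)) = false := by
        rw [← Bool.not_eq_true, Bool.and_eq_true]
        rintro ⟨ha, hb⟩
        exact htrip ⟨x - 2, (hmem _).mp hb, by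
          constructor
          · rw [Bool.and_eq_true]
            constructor
            · have : x - 2 + 1 = x - 1 := by ring
              rw [this]; exact ha
            · have : x - 2 + 2 = x := by ring
              rw [this]; exact (hmem x).mpr hx
          · right; right; ring⟩
      rw [h1, h2, h3]
      rfl
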